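-- pv_equiv track=rewrite | github.com/JackWilliamQuinton/python-interview-questions | test3.py | similar_license_plates
-- ===== SOURCE A (Python) =====
-- def similar_license_plates(plate1, plate2):
--     shape_dict = {"1": ["1", "I", "T"],
--                   "0": ["0", "O", "Q"],
--                   "Z": ["Z", "2"],
--                   "S": ["S", "5"],
--                   "8": ["8", "B"]
--                   }
--
--     def convert_plate(plate):
--         plate = plate.replace(" ", "")
--         for index, char in enumerate(plate):
--             for key, item in shape_dict.items():
--                 if char in item:
--                     plate = plate.replace(plate[index], key)
--         return (plate)
--
--     if convert_plate(plate1) == convert_plate(plate2):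
--         return True
--     else:
--         return False
-- ===== SOURCE B (Python) =====
-- def similar_license_plates(plate1, plate2):
--     pairs = {frozenset(p) for p in [("1", "I"), ("1", "T"), ("I", "T"),
--                                     ("0", "O"), ("0", "Q"), ("O", "Q"),
--                                     ("Z", "2"), ("S", "5"), ("8", "B")]}
--     i, j = 0, 0
--     n, m = len(plate1), len(plate2)
--     while True:
--         while i < n and plate1[i] == " ":
--             i += 1
--         while j < m and plate2[j] == " ":
--             j += 1
--         if i == n or j == m:
--             return i == n and j == m
--         x, y = plate1[i], plate2[j]
--         if x != y and frozenset((x, y)) not in pairs: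
--             return False
--         i += 1
--         j += 1
-- ===== Notes on version B (the rewrite author's own statement) =====
-- stated objective: faster
-- what changed: B never normalizes: it walks the two raw plates with two pointers, skipping spaces inline, and tests each aligned character pair against a symmetric set of confusable pairs, instead of A's building two normalized strings via per-character whole-string replace() loops and comparing them.
import Mathlib
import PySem

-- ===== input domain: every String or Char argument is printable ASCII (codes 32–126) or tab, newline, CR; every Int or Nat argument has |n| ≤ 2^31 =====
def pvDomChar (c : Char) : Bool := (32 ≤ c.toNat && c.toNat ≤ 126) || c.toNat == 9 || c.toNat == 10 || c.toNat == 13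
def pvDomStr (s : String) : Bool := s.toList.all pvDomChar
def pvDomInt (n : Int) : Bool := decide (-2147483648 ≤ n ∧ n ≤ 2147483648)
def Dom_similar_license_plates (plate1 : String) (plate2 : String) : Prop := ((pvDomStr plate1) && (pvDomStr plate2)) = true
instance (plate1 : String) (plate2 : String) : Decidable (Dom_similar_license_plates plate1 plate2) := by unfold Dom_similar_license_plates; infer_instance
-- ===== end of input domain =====

-- B walks the two raw plates with two pointers, skipping spaces inline and testing each aligned
-- pair against a symmetric set of confusable pairs — it never normalizes or builds any string
-- (faster: one pass instead of A's per-char whole-string replace() loops).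

-- ===== PORT A =====
-- Python 1-char strings are represented as `List Char` of length 1; whole plates as `String`.
def shapeDictA : List (List Char × List (List Char)) :=
  [(['1'], [['1'], ['I'], ['T']]),
   (['0'], [['0'], ['O'], ['Q']]),
   (['Z'], [['Z'], ['2']]),
   (['S'], [['S'], ['5']]),
   (['8'], [['8'], ['B']])]

-- literal transliteration of A's convert_plate: plate = plate.replace(" ", ""); then
-- for index, char in enumerate(plate): for key, item in shape_dict.items():
--   if char in item: plate = plate.replace(plate[index], key)
def convertPlateA (plate : String) : List Char :=
  let p := PySem.Chars.replace plate.toList [' '] []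
  (PySem.List.enumerate p 0).foldl
    (fun pl ic =>
      shapeDictA.foldl
        (fun pl kv =>
          if [ic.2] ∈ kv.2 then
            match PySem.List.pyGet? pl ic.1 with
            | some cur => PySem.Chars.replace pl [cur] kv.1
            | none => pl
          else pl) pl) p

def similar_license_plates (plate1 : String) (plate2 : String) : Bool :=
  if convertPlateA plate1 = convertPlateA plate2 then true else false

-- ===== PORT B =====
-- pairs = {frozenset(p) for p in [...]}; frozenset membership is ported as unordered-pair equality
def pairsB : List (Char × Char) :=
  [('1', 'I'), ('1', 'T'), ('I', 'T'),
   ('0', 'O'), ('0', 'Q'), ('O', 'Q'),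
   ('Z', '2'), ('S', '5'), ('8', 'B')]

-- "x != y and frozenset((x, y)) not in pairs" → not (confusable x y)
def confusable (x y : Char) : Bool :=
  x == y || pairsB.any (fun p => (p.1 == x && p.2 == y) || (p.1 == y && p.2 == x))

-- Source B's two-pointer while loop, as recursion on the two suffixes: skip spaces of plate1,
-- then of plate2, stop when either is exhausted, otherwise compare the aligned pair and advance both.
def goB (l1 l2 : List Char) : Bool :=
  match l1 with
  | c1 :: t1 =>
    if c1 = ' ' then goB t1 l2
    else
      match l2 with
      | c2 :: t2 =>
        if c2 = ' ' then goB (c1 :: t1) t2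
        else confusable c1 c2 && goB t1 t2
      | [] => false
  | [] =>
    match l2 with
    | c2 :: t2 => if c2 = ' ' then goB [] t2 else false
    | [] => true
termination_by l1.length + l2.length
decreasing_by all_goals simp <;> omega

def similar_license_plates_alt (plate1 : String) (plate2 : String) : Bool :=
  goB plate1.toList plate2.toList

-- ===== PRECONDITION & SPEC =====
def Spec_similar_license_plates (plate1 : String) (plate2 : String) (out : Bool) : Prop := out = similar_license_plates_alt plate1 plate2
instance (plate1 : String) (plate2 : String) (out : Bool) : Decidable (Spec_similar_license_plates plate1 plate2 out) := by unfold Spec_similar_license_plates; infer_instance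

-- ===== CLAIM (what is proved, stated in full; the proofs are below) =====
def Claim_equal_similar_license_plates : Prop := ∀ (plate1 : String) (plate2 : String), Dom_similar_license_plates plate1 plate2 → Spec_similar_license_plates plate1 plate2 (similar_license_plates plate1 plate2)

-- ===== LEMMAS AND PROOFS =====

-- canonical per-char normalizer (proof-side only)
def normC (c : Char) : Char :=
  if c = '1' ∨ c = 'I' ∨ c = 'T' then '1'
  else if c = '0' ∨ c = 'O' ∨ c = 'Q' then '0'
  else if c = 'Z' ∨ c = '2' then 'Z'
  else if c = 'S' ∨ c = '5' then 'S'
  else if c = '8' ∨ c = 'B' then '8'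
  else c

def specialsC : List Char := ['1', 'I', 'T', '0', 'O', 'Q', 'Z', '2', 'S', '5', '8', 'B']

lemma beqfL {a b : Char} (h : b ≠ a) : (a == b) = false := by
  rw [beq_eq_false_iff_ne]; exact fun e => h e.symm
lemma beqfR {a b : Char} (h : a ≠ b) : (a == b) = false := by
  rw [beq_eq_false_iff_ne]; exact h
lemma confusable_eq (x y : Char) : confusable x y = (normC x == normC y) := by
  by_cases hx : x ∈ specialsC <;> by_cases hy : y ∈ specialsC <;>
    simp only [specialsC, List.mem_cons, List.not_mem_nil, or_false] at hx hy
  · rcases hx with rfl | rfl | rfl | rfl | rfl | rfl | rfl | rfl | rfl | rfl | rfl | rfl <;>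
      rcases hy with rfl | rfl | rfl | rfl | rfl | rfl | rfl | rfl | rfl | rfl | rfl | rfl <;>
      decide
  · push Not at hy
    obtain ⟨y1, y2, y3, y4, y5, y6, y7, y8, y9, y10, y11, y12⟩ := hy
    rcases hx with rfl | rfl | rfl | rfl | rfl | rfl | rfl | rfl | rfl | rfl | rfl | rfl <;>
      simp [confusable, pairsB, normC, y1, y2, y3, y4, y5, y6, y7, y8, y9, y10, y11, y12, beqfL y1, beqfR y1, beqfL y2, beqfR y2, beqfL y3, beqfR y3, beqfL y4, beqfR y4, beqfL y5, beqfR y5, beqfL y6, beqfR y6, beqfL y7, beqfR y7, beqfL y8, beqfR y8, beqfL y9, beqfR y9, beqfL y10, beqfR y10, beqfL y11, beqfR y11, beqfL y12, beqfR y12]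
  · push Not at hx
    obtain ⟨x1, x2, x3, x4, x5, x6, x7, x8, x9, x10, x11, x12⟩ := hx
    rcases hy with rfl | rfl | rfl | rfl | rfl | rfl | rfl | rfl | rfl | rfl | rfl | rfl <;>
      simp [confusable, pairsB, normC, x1, x2, x3, x4, x5, x6, x7, x8, x9, x10, x11, x12, beqfL x1, beqfR x1, beqfL x2, beqfR x2, beqfL x3, beqfR x3, beqfL x4, beqfR x4, beqfL x5, beqfR x5, beqfL x6, beqfR x6, beqfL x7, beqfR x7, beqfL x8, beqfR x8, beqfL x9, beqfR x9, beqfL x10, beqfR x10, beqfL x11, beqfR x11, beqfL x12, beqfR x12]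
  · push Not at hx hy
    obtain ⟨x1, x2, x3, x4, x5, x6, x7, x8, x9, x10, x11, x12⟩ := hx
    obtain ⟨y1, y2, y3, y4, y5, y6, y7, y8, y9, y10, y11, y12⟩ := hy
    simp [confusable, pairsB, normC, x1, x2, x3, x4, x5, x6, x7, x8, x9, x10, x11, x12, beqfL x1, beqfR x1, beqfL x2, beqfR x2, beqfL x3, beqfR x3, beqfL x4, beqfR x4, beqfL x5, beqfR x5, beqfL x6, beqfR x6, beqfL x7, beqfR x7, beqfL x8, beqfR x8, beqfL x9, beqfR x9, beqfL x10, beqfR x10, beqfL x11, beqfR x11, beqfL x12, beqfR x12, y1, y2, y3, y4, y5, y6, y7, y8, y9, y10, y11, y12,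
      beqfL y1, beqfR y1, beqfL y2, beqfR y2, beqfL y3, beqfR y3, beqfL y4, beqfR y4, beqfL y5, beqfR y5, beqfL y6, beqfR y6, beqfL y7, beqfR y7, beqfL y8, beqfR y8, beqfL y9, beqfR y9, beqfL y10, beqfR y10, beqfL y11, beqfR y11, beqfL y12, beqfR y12]

lemma normC_idem (c : Char) : normC (normC c) = normC c := by
  unfold normC; split_ifs <;> simp_all

lemma go_single (a : Char) (new : List Char) :
    ∀ (fuel : Nat) (l acc : List Char), l.length ≤ fuel →
      PySem.Chars.replace.go [a] new fuel l acc
        = acc.reverse ++ l.flatMap (fun d => if d = a then new else [d]) := by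
  intro fuel
  induction fuel with
  | zero =>
    intro l acc h
    have : l = [] := List.eq_nil_of_length_eq_zero (Nat.le_zero.mp h)
    subst this; simp [PySem.Chars.replace.go]
  | succ n ih =>
    intro l acc h
    cases l with
    | nil => simp [PySem.Chars.replace.go]
    | cons c t =>
      simp only [PySem.Chars.replace.go]
      by_cases hc : c = a
      · subst hc
        rw [if_pos (by simp [List.isPrefixOf])]
        rw [ih _ _ (by simpa using Nat.le_of_succ_le_succ h)]
        simp
      · rw [if_neg (by simp [List.isPrefixOf]; exact fun h' => hc h'.symm)]
        rw [ih _ _ (by simpa using Nat.le_of_succ_le_succ h)]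
        simp [hc]

lemma replace_single (a : Char) (new l : List Char) :
    PySem.Chars.replace l [a] new = l.flatMap (fun d => if d = a then new else [d]) := by
  rw [PySem.Chars.replace]
  rw [if_neg (by simp)]
  rw [go_single a new l.length l [] le_rfl]
  simp

lemma replace_single_map (a k : Char) (l : List Char) :
    PySem.Chars.replace l [a] [k] = l.map (fun d => if d = a then k else d) := by
  rw [replace_single]
  induction l with
  | nil => rfl
  | cons c t ih => by_cases hc : c = a <;> simp_all

lemma replace_space_eq_filter (l : List Char) :
    PySem.Chars.replace l [' '] [] = l.filter (fun c => !(c == ' ')) := by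
  rw [replace_single]
  induction l with
  | nil => rfl
  | cons c t ih => by_cases hc : c = ' ' <;> simp_all [List.filter_cons]

lemma step_general (c k : Char) (h : Char → Char)
    (hk : normC c = k)
    (ha : ∀ d, h d = d ∨ h d = normC d) :
    (∀ d, (if h d = h c then k else h d) = d ∨ (if h d = h c then k else h d) = normC d) ∧
    (∀ d, h d = normC d → (if h d = h c then k else h d) = normC d) ∧
    (if h c = h c then k else h c) = normC c := by
  refine ⟨?_, ?_, by simp [hk]⟩
  · intro d
    by_cases hd : h d = h c
    · rw [if_pos hd]
      rcases ha c with hc | hc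
      · rcases ha d with h1 | h1
        · right; rw [← hk]; congr 1; rw [← h1, hd, hc]
        · have e1 : normC d = c := by rw [← h1, hd, hc]
          have e2 : normC c = c := by rw [← e1, normC_idem, e1]
          right; rw [← hk, e2, e1]
      · rcases ha d with h1 | h1
        · left; rw [← h1, hd, hc, hk]
        · right; rw [← h1, hd, hc, hk]
    · rw [if_neg hd]; exact ha d
  · intro d hnd
    by_cases hd : h d = h c
    · rw [if_pos hd]
      rcases ha c with hc | hc
      · have e1 : normC d = c := by rw [← hnd, hd, hc]
        have e2 : normC c = c := by rw [← e1, normC_idem, e1]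
        rw [← hk, e2, e1]
      · rw [← hnd, hd, hc, hk]
    · rw [if_neg hd]; exact hnd

lemma inner_branch (l : List Char) (h : Char → Char) (i : Nat) (hi : i < l.length) (k : Char) :
    (match PySem.List.pyGet? (l.map h) ((i : Int)) with
     | some cur => PySem.Chars.replace (l.map h) [cur] [k]
     | none => l.map h)
      = l.map (fun d => if h d = h l[i] then k else h d) := by
  rw [PySem.List.pyGet?_ofNat (l.map h) i (by simpa using hi)]
  simp only [List.getElem_map]
  rw [replace_single_map]
  rw [List.map_map]
  rfl

lemma inner_fold_eq (l : List Char) (h : Char → Char) (i : Nat) (hi : i < l.length)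
    (ha : ∀ d, h d = d ∨ h d = normC d) :
    ∃ h' : Char → Char,
      shapeDictA.foldl
        (fun pl kv =>
          if [l[i]] ∈ kv.2 then
            match PySem.List.pyGet? pl ((i : Int)) with
            | some cur => PySem.Chars.replace pl [cur] kv.1
            | none => pl
          else pl) (l.map h) = l.map h' ∧
      (∀ d, h' d = d ∨ h' d = normC d) ∧ (∀ d, h d = normC d → h' d = normC d) ∧ h' l[i] = normC l[i] := by
  simp only [shapeDictA, List.foldl_cons, List.foldl_nil]
  by_cases g1 : l[i] = '1' ∨ l[i] = 'I' ∨ l[i] = 'T'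
  · refine ⟨fun d => if h d = h l[i] then '1' else h d, ?_, ?_⟩
    · have cpos : [l[i]] ∈ [['1'], ['I'], ['T']] := by rcases g1 with g1 | g1 | g1 <;> rw [g1] <;> decide
      have cn1 : ¬ [l[i]] ∈ [['0'], ['O'], ['Q']] := by rcases g1 with g1 | g1 | g1 <;> rw [g1] <;> decide
      have cn2 : ¬ [l[i]] ∈ [['Z'], ['2']] := by rcases g1 with g1 | g1 | g1 <;> rw [g1] <;> decide
      have cn3 : ¬ [l[i]] ∈ [['S'], ['5']] := by rcases g1 with g1 | g1 | g1 <;> rw [g1] <;> decide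
      have cn4 : ¬ [l[i]] ∈ [['8'], ['B']] := by rcases g1 with g1 | g1 | g1 <;> rw [g1] <;> decide
      rw [if_pos cpos, inner_branch l h i hi '1', if_neg cn1, if_neg cn2, if_neg cn3, if_neg cn4]
    · exact step_general l[i] '1' h (by unfold normC; rw [if_pos g1]) ha
  by_cases g2 : l[i] = '0' ∨ l[i] = 'O' ∨ l[i] = 'Q'
  · refine ⟨fun d => if h d = h l[i] then '0' else h d, ?_, ?_⟩
    · have cpos : [l[i]] ∈ [['0'], ['O'], ['Q']] := by rcases g2 with g2 | g2 | g2 <;> rw [g2] <;> decide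
      have cn0 : ¬ [l[i]] ∈ [['1'], ['I'], ['T']] := by rcases g2 with g2 | g2 | g2 <;> rw [g2] <;> decide
      have cn2 : ¬ [l[i]] ∈ [['Z'], ['2']] := by rcases g2 with g2 | g2 | g2 <;> rw [g2] <;> decide
      have cn3 : ¬ [l[i]] ∈ [['S'], ['5']] := by rcases g2 with g2 | g2 | g2 <;> rw [g2] <;> decide
      have cn4 : ¬ [l[i]] ∈ [['8'], ['B']] := by rcases g2 with g2 | g2 | g2 <;> rw [g2] <;> decide
      rw [if_neg cn0, if_pos cpos, inner_branch l h i hi '0', if_neg cn2, if_neg cn3, if_neg cn4]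
    · exact step_general l[i] '0' h (by unfold normC; rw [if_neg (by rcases g2 with g2 | g2 | g2 <;> rw [g2] <;> decide : ¬ (l[i] = '1' ∨ l[i] = 'I' ∨ l[i] = 'T')), if_pos g2]) ha
  by_cases g3 : l[i] = 'Z' ∨ l[i] = '2'
  · refine ⟨fun d => if h d = h l[i] then 'Z' else h d, ?_, ?_⟩
    · have cpos : [l[i]] ∈ [['Z'], ['2']] := by rcases g3 with g3 | g3 <;> rw [g3] <;> decide
      have cn0 : ¬ [l[i]] ∈ [['1'], ['I'], ['T']] := by rcases g3 with g3 | g3 <;> rw [g3] <;> decide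
      have cn1 : ¬ [l[i]] ∈ [['0'], ['O'], ['Q']] := by rcases g3 with g3 | g3 <;> rw [g3] <;> decide
      have cn3 : ¬ [l[i]] ∈ [['S'], ['5']] := by rcases g3 with g3 | g3 <;> rw [g3] <;> decide
      have cn4 : ¬ [l[i]] ∈ [['8'], ['B']] := by rcases g3 with g3 | g3 <;> rw [g3] <;> decide
      rw [if_neg cn0, if_neg cn1, if_pos cpos, inner_branch l h i hi 'Z', if_neg cn3, if_neg cn4]
    · exact step_general l[i] 'Z' h (by unfold normC; rw [if_neg (by rcases g3 with g3 | g3 <;> rw [g3] <;> decide : ¬ (l[i] = '1' ∨ l[i] = 'I' ∨ l[i] = 'T')), if_neg (by rcases g3 with g3 | g3 <;> rw [g3] <;> decide : ¬ (l[i] = '0' ∨ l[i] = 'O' ∨ l[i] = 'Q')), if_pos g3]) ha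
  by_cases g4 : l[i] = 'S' ∨ l[i] = '5'
  · refine ⟨fun d => if h d = h l[i] then 'S' else h d, ?_, ?_⟩
    · have cpos : [l[i]] ∈ [['S'], ['5']] := by rcases g4 with g4 | g4 <;> rw [g4] <;> decide
      have cn0 : ¬ [l[i]] ∈ [['1'], ['I'], ['T']] := by rcases g4 with g4 | g4 <;> rw [g4] <;> decide
      have cn1 : ¬ [l[i]] ∈ [['0'], ['O'], ['Q']] := by rcases g4 with g4 | g4 <;> rw [g4] <;> decide
      have cn2 : ¬ [l[i]] ∈ [['Z'], ['2']] := by rcases g4 with g4 | g4 <;> rw [g4] <;> decide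
      have cn4 : ¬ [l[i]] ∈ [['8'], ['B']] := by rcases g4 with g4 | g4 <;> rw [g4] <;> decide
      rw [if_neg cn0, if_neg cn1, if_neg cn2, if_pos cpos, inner_branch l h i hi 'S', if_neg cn4]
    · exact step_general l[i] 'S' h (by unfold normC; rw [if_neg (by rcases g4 with g4 | g4 <;> rw [g4] <;> decide : ¬ (l[i] = '1' ∨ l[i] = 'I' ∨ l[i] = 'T')), if_neg (by rcases g4 with g4 | g4 <;> rw [g4] <;> decide : ¬ (l[i] = '0' ∨ l[i] = 'O' ∨ l[i] = 'Q')), if_neg (by rcases g4 with g4 | g4 <;> rw [g4] <;> decide : ¬ (l[i] = 'Z' ∨ l[i] = '2')), if_pos g4]) ha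
  by_cases g5 : l[i] = '8' ∨ l[i] = 'B'
  · refine ⟨fun d => if h d = h l[i] then '8' else h d, ?_, ?_⟩
    · have cpos : [l[i]] ∈ [['8'], ['B']] := by rcases g5 with g5 | g5 <;> rw [g5] <;> decide
      have cn0 : ¬ [l[i]] ∈ [['1'], ['I'], ['T']] := by rcases g5 with g5 | g5 <;> rw [g5] <;> decide
      have cn1 : ¬ [l[i]] ∈ [['0'], ['O'], ['Q']] := by rcases g5 with g5 | g5 <;> rw [g5] <;> decide
      have cn2 : ¬ [l[i]] ∈ [['Z'], ['2']] := by rcases g5 with g5 | g5 <;> rw [g5] <;> decide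
      have cn3 : ¬ [l[i]] ∈ [['S'], ['5']] := by rcases g5 with g5 | g5 <;> rw [g5] <;> decide
      rw [if_neg cn0, if_neg cn1, if_neg cn2, if_neg cn3, if_pos cpos, inner_branch l h i hi '8']
    · exact step_general l[i] '8' h (by unfold normC; rw [if_neg (by rcases g5 with g5 | g5 <;> rw [g5] <;> decide : ¬ (l[i] = '1' ∨ l[i] = 'I' ∨ l[i] = 'T')), if_neg (by rcases g5 with g5 | g5 <;> rw [g5] <;> decide : ¬ (l[i] = '0' ∨ l[i] = 'O' ∨ l[i] = 'Q')), if_neg (by rcases g5 with g5 | g5 <;> rw [g5] <;> decide : ¬ (l[i] = 'Z' ∨ l[i] = '2')), if_neg (by rcases g5 with g5 | g5 <;> rw [g5] <;> decide : ¬ (l[i] = 'S' ∨ l[i] = '5')), if_pos g5]) ha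
  · have hn : normC l[i] = l[i] := by
      unfold normC; rw [if_neg g1, if_neg g2, if_neg g3, if_neg g4, if_neg g5]
    refine ⟨h, ?_, ha, fun d hd => hd, ?_⟩
    · rw [if_neg (by simpa using g5), if_neg (by simpa using g4), if_neg (by simpa using g3),
        if_neg (by simpa using g2), if_neg (by simpa using g1)]
    · rcases ha l[i] with e | e
      · rw [e, hn]
      · exact e

lemma outer_fold_eq (l : List Char) (e : List (Int × Char))
    (he : ∀ p ∈ e, ∃ k : Nat, ∃ _ : k < l.length, p = ((k : Int), l[k])) :
    ∀ h : Char → Char, (∀ d, h d = d ∨ h d = normC d) →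
    ∃ h' : Char → Char,
      e.foldl
        (fun pl ic =>
          shapeDictA.foldl
            (fun pl kv =>
              if [ic.2] ∈ kv.2 then
                match PySem.List.pyGet? pl ic.1 with
                | some cur => PySem.Chars.replace pl [cur] kv.1
                | none => pl
              else pl) pl) (l.map h) = l.map h' ∧
      (∀ p ∈ e, h' p.2 = normC p.2) ∧
      (∀ d, h d = normC d → h' d = normC d) ∧
      (∀ d, h' d = d ∨ h' d = normC d) := by
  induction e with
  | nil => intro h ha; exact ⟨h, rfl, by simp, fun d hd => hd, ha⟩
  | cons p e ih =>
    intro h ha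
    obtain ⟨k, hk, rfl⟩ := he p (List.mem_cons_self ..)
    obtain ⟨h1, heq1, ha1, hpres1, hlast1⟩ := inner_fold_eq l h k hk ha
    obtain ⟨h', heq', hall', hpres', ha'⟩ :=
      ih (fun q hq => he q (List.mem_cons_of_mem _ hq)) h1 ha1
    refine ⟨h', ?_, ?_, fun d hd => hpres' d (hpres1 d hd), ha'⟩
    · rw [List.foldl_cons, heq1, heq']
    · intro q hq
      rcases List.mem_cons.mp hq with rfl | hq'
      · exact hpres' _ hlast1
      · exact hall' q hq'

lemma convertPlateA_eq (plate : String) :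
    convertPlateA plate = (PySem.Chars.replace plate.toList [' '] []).map normC := by
  unfold convertPlateA
  set l := PySem.Chars.replace plate.toList [' '] [] with hl
  obtain ⟨h', heq, hall, -, -⟩ :=
    outer_fold_eq l (PySem.List.enumerate l 0)
      (by
        intro p hp
        obtain ⟨k, hk, rfl⟩ := (PySem.List.mem_enumerate_iff l 0 p).mp hp
        exact ⟨k, hk, by simp⟩)
      id (fun d => Or.inl rfl)
  rw [List.map_id] at heq
  rw [heq]
  apply List.map_congr_left
  intro x hx
  obtain ⟨k, hk, rfl⟩ := List.mem_iff_getElem.mp hx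
  exact hall ((k : Int), l[k]) ((PySem.List.mem_enumerate_iff l 0 _).mpr ⟨k, hk, by simp⟩)

lemma goB_eq (l1 l2 : List Char) :
    goB l1 l2 = ((l1.filter (fun c => !(c == ' '))).map normC
                  == (l2.filter (fun c => !(c == ' '))).map normC) := by
  fun_induction goB l1 l2 <;> simp_all [List.filter_cons, confusable_eq]

-- ===== VERDICT (by name: the statement is the Claim_ definition above) =====
theorem similar_license_plates_spec : Claim_equal_similar_license_plates := by
  intro plate1 plate2 _
  unfold Spec_similar_license_plates similar_license_plates similar_license_plates_alt
  rw [convertPlateA_eq plate1, convertPlateA_eq plate2,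
    replace_space_eq_filter, replace_space_eq_filter, goB_eq]
  by_cases h : (plate1.toList.filter (fun c => !(c == ' '))).map normC
      = (plate2.toList.filter (fun c => !(c == ' '))).map normC
  · simp [h]
  · simp [h]
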